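-- pv_equiv track=rewrite | github.com/nehayadav827/Email-Triage-System | utils/text_processing.py | is_spam_like
-- ===== SOURCE A (Python) =====
-- def is_spam_like(text: str) -> bool:
--     """Check if text looks like spam."""
--     spam_indicators = [
--         "click here", "win", "free", "prize",
--         "verify your account", "suspended",
--         "limited time", "act now",
--     ]
--     text_lower = text.lower()
--     return any(indicator in text_lower for indicator in spam_indicators)
-- ===== SOURCE B (Python) =====
-- _SPAM_PHRASES = (
--     "click here", "win", "free", "prize",
--     "verify your account", "suspended",
--     "limited time", "act now",
-- )
--
-- def is_spam_like(text: str) -> bool: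
--     """Check if text looks like spam: one left-to-right pass over positions,
--     testing at each position whether any spam phrase starts there."""
--     t = text.lower()
--     for i in range(len(t)):
--         for p in _SPAM_PHRASES:
--             if t.startswith(p, i):
--                 return True
--     return False
-- ===== Notes on version B (the rewrite author's own statement) =====
-- stated objective: alternative
-- what changed: A runs eight independent substring scans via any(indicator in text_lower ...); B lowercases once and makes a single left-to-right pass over positions, at each position testing whether any phrase starts there (t.startswith(p, i)), returning early on the first hit.
import Mathlib
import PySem

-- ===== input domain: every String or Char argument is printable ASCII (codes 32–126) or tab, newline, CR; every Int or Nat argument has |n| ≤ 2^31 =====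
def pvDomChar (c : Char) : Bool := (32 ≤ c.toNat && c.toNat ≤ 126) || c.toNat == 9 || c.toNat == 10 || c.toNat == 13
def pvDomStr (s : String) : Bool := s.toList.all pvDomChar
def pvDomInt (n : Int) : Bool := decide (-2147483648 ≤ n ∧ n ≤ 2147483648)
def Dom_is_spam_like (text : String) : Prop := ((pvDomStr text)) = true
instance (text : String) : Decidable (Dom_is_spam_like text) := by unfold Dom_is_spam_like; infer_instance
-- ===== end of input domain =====

-- B replaces A's eight independent substring scans by one left-to-right pass over
-- positions, testing at each position whether any phrase starts there (objective: alternative).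

-- ===== PORT A =====
def spamIndicators : List String :=
  ["click here", "win", "free", "prize",
   "verify your account", "suspended",
   "limited time", "act now"]

def is_spam_like (text : String) : Bool :=
  let text_lower := PySem.Str.lower text
  spamIndicators.any (fun indicator => PySem.Str.isIn indicator text_lower)

-- ===== PORT B =====
def spamPhrases : List (List Char) :=
  ["click here".toList, "win".toList, "free".toList, "prize".toList,
   "verify your account".toList, "suspended".toList,
   "limited time".toList, "act now".toList]

-- the loop 'for i in range(len(t)): for p in _SPAM_PHRASES: if t.startswith(p, i)':
-- recursion over the successive suffixes of t
def scanSpam : List Char → Bool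
  | [] => false
  | c :: rest =>
      if spamPhrases.any (fun p => PySem.Chars.startswith (c :: rest) p) then true
      else scanSpam rest

def is_spam_like_alt (text : String) : Bool :=
  scanSpam (PySem.Str.lower text).toList

-- ===== PRECONDITION & SPEC =====
def Spec_is_spam_like (text : String) (out : Bool) : Prop := out = is_spam_like_alt text
instance (text : String) (out : Bool) : Decidable (Spec_is_spam_like text out) := by unfold Spec_is_spam_like; infer_instance

-- ===== CLAIM (what is proved, stated in full; the proofs are below) =====
def Claim_equal_is_spam_like : Prop := ∀ (text : String), Dom_is_spam_like text → Spec_is_spam_like text (is_spam_like text)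

-- ===== LEMMAS AND PROOFS =====

lemma spamPhrases_eq : spamPhrases = spamIndicators.map String.toList := by decide

lemma spamPhrases_ne_nil : ∀ p ∈ spamPhrases, p ≠ [] := by decide

lemma scanSpam_iff (l : List Char) :
    scanSpam l = true ↔ ∃ p ∈ spamPhrases, p <:+: l := by
  induction l with
  | nil =>
      simp only [scanSpam, Bool.false_eq_true, false_iff]
      rintro ⟨p, hp, hinf⟩
      exact spamPhrases_ne_nil p hp (List.eq_nil_of_infix_nil hinf)
  | cons c rest ih =>
      simp only [scanSpam]
      split_ifs with h
      · simp only [true_iff]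
        rcases List.any_eq_true.mp h with ⟨p, hp, hsw⟩
        exact ⟨p, hp, ((PySem.Chars.startswith_iff _ _).mp hsw).isInfix⟩
      · rw [ih]
        constructor
        · rintro ⟨p, hp, hinf⟩; exact ⟨p, hp, hinf.trans (List.suffix_cons c rest).isInfix⟩
        · rintro ⟨p, hp, hinf⟩
          rcases List.infix_cons_iff.mp hinf with hpre | hinf'
          · exact absurd (List.any_eq_true.mpr ⟨p, hp, (PySem.Chars.startswith_iff _ _).mpr hpre⟩) h
          · exact ⟨p, hp, hinf'⟩

-- ===== VERDICT (by name: the statement is the Claim_ definition above) =====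
theorem is_spam_like_spec : Claim_equal_is_spam_like := by
  intro text _
  unfold Spec_is_spam_like is_spam_like is_spam_like_alt
  rw [Bool.eq_iff_iff, scanSpam_iff, List.any_eq_true, spamPhrases_eq]
  constructor
  · rintro ⟨ind, hind, hin⟩
    exact ⟨ind.toList, List.mem_map_of_mem hind, (PySem.Str.isIn_iff_infix _ _).mp hin⟩
  · rintro ⟨p, hp, hinf⟩
    rcases List.mem_map.mp hp with ⟨ind, hind, rfl⟩
    exact ⟨ind, hind, (PySem.Str.isIn_iff_infix _ _).mpr hinf⟩
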